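-- pv_equiv track=rewrite | github.com/Rebiya/plagiarism-checker-rk | backend/hashing.py | rolling_hash
-- ===== SOURCE A (Python) =====
-- from typing import Dict, List, Tuple, Set
--
-- DEFAULT_B = 257
--
-- DEFAULT_M = 10**9 + 7
--
-- def rolling_hash(ids: List[int], k: int,
--                  B: int = DEFAULT_B,
--                  M: int = DEFAULT_M) -> List[Tuple[int, int]]:
--     """Compute rolling hashes for n-grams."""
--     n = len(ids)
--     if n < k:
--         return []
--
--     current = 0
--     out: List[Tuple[int, int]] = []
--
--     power = pow(B, k-1, M)  # B^(k-1)
--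
--     # initial window
--     for i in range(k):
--         current = (current * B + ids[i]) % M
--     out.append((current, 0))
--
--     # slide
--     for i in range(k, n):
--         current = (current - (ids[i-k] * power)) % M
--         current = (current * B + ids[i]) % M
--         out.append((current, i-k+1))
--
--     return out
-- ===== SOURCE B (Python) =====
-- DEFAULT_B = 257
--
-- DEFAULT_M = 10**9 + 7
--
--
-- def rolling_hash(ids, k, B=DEFAULT_B, M=DEFAULT_M):
--     """Compute rolling hashes for n-grams by direct per-window Horner evaluation."""
--     n = len(ids)
--     if n < k:
--         return []
--     out = []
--     for start in range(n - k + 1):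
--         h = 0
--         for j in range(k):
--             h = (h * B + ids[start + j]) % M
--         out.append((h, start))
--     return out
-- ===== Notes on version B (the rewrite author's own statement) =====
-- stated objective: simpler
-- what changed: Replaces the incremental sliding-window update (with precomputed B^(k-1) used to subtract the outgoing element) by direct per-window recomputation: for each start position the window hash is computed from scratch by Horner's rule, so no `current`, `power` or pow() is maintained.
-- outside the precondition, e.g. on rolling_hash([1, 2], 0, 3, 5): A returns [(0, 0), (0, 1), (0, 2)], B returns [(0, 0), (0, 1), (0, 2)]
import Mathlib
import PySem

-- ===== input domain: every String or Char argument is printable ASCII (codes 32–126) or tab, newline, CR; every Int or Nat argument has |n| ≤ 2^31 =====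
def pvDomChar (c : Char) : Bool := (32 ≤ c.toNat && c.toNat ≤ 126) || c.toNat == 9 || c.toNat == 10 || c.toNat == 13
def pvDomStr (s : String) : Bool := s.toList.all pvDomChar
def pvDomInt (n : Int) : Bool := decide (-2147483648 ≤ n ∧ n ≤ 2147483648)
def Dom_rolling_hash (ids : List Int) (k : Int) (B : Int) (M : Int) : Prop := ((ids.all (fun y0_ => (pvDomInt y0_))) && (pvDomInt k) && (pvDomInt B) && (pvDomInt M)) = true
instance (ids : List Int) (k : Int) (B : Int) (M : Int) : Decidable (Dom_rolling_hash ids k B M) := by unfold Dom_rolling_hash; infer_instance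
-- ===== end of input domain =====

-- B replaces A's sliding-window update by direct per-window Horner recomputation (simpler: no
-- `current` state, no precomputed power, no pow()); RETURN-value equivalence on Pre_ is proved.

-- ===== PORT A =====
def rolling_hash (ids : List Int) (k : Int) (B : Int) (M : Int) : List (Int × Int) :=
  let n : Int := ids.length
  if n < k then []
  else
    -- pow(B, k-1, M): PySem.Int.powMod takes a Nat exponent, exact for the k ≥ 1 of Pre_
    -- (Python's modular-inverse behaviour for k ≤ 0 is outside Pre_)
    let power := PySem.Int.powMod B (k - 1).toNat M
    let current := (PySem.List.pyRange 0 k 1).foldl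
      (fun current i => PySem.Int.mod (current * B + PySem.List.pyGetD ids i 0) M) 0
    let st := (PySem.List.pyRange k n 1).foldl
      (fun (st : Int × List (Int × Int)) i =>
        let c1 := PySem.Int.mod (st.1 - PySem.List.pyGetD ids (i - k) 0 * power) M
        let c2 := PySem.Int.mod (c1 * B + PySem.List.pyGetD ids i 0) M
        (c2, st.2 ++ [(c2, i - k + 1)]))
      (current, [(current, 0)])
    st.2

-- ===== PORT B =====
def rolling_hash_alt (ids : List Int) (k : Int) (B : Int) (M : Int) : List (Int × Int) :=
  let n : Int := ids.length
  if n < k then []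
  else
    (PySem.List.pyRange 0 (n - k + 1) 1).foldl
      (fun out start =>
        let h := (PySem.List.pyRange 0 k 1).foldl
          (fun h j => PySem.Int.mod (h * B + PySem.List.pyGetD ids (start + j) 0) M) 0
        out ++ [(h, start)]) []

-- ===== PRECONDITION & SPEC =====
-- Pre_ excludes k ≤ 0, where A's pow(B, k-1, M) takes a modular inverse (raising ValueError for
-- non-coprime B, while for k < 0 the slide's out-of-range ids[i-k] always raises IndexError; at
-- k = 0 with coprime B, M the inverse makes A return all-zero hashes, which B also returns), and
-- M = 0 with len(ids) ≥ k, where A raises ValueError/ZeroDivisionError.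
def Pre_rolling_hash (ids : List Int) (k : Int) (B : Int) (M : Int) : Prop :=
  1 ≤ k ∧ ((ids.length : Int) < k ∨ M ≠ 0)
instance (ids : List Int) (k : Int) (B : Int) (M : Int) : Decidable (Pre_rolling_hash ids k B M) := by
  unfold Pre_rolling_hash; infer_instance

def pvWitness_rolling_hash : List Int × Int × Int × Int := ([3, 1, 4, 1, 5], 2, 257, 97)

def Spec_rolling_hash (ids : List Int) (k : Int) (B : Int) (M : Int) (out : List (Int × Int)) : Prop := out = rolling_hash_alt ids k B M
instance (ids : List Int) (k : Int) (B : Int) (M : Int) (out : List (Int × Int)) : Decidable (Spec_rolling_hash ids k B M out) := by unfold Spec_rolling_hash; infer_instance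

-- ===== CLAIM (what is proved, stated in full; the proofs are below) =====
def Claim_equal_rolling_hash : Prop := ∀ (ids : List Int) (k : Int) (B : Int) (M : Int), Dom_rolling_hash ids k B M → Pre_rolling_hash ids k B M → Spec_rolling_hash ids k B M (rolling_hash ids k B M)

-- ===== LEMMAS AND PROOFS =====

-- the hash of the window of length kk starting at position s (with %), and its pure Horner value
def pvWin (ids : List Int) (kk : Nat) (B M : Int) (s : Nat) : Int :=
  (List.range kk).foldl (fun h j => PySem.Int.mod (h * B + ids.getD (s + j) 0) M) 0

def pvP (ids : List Int) (kk : Nat) (B : Int) (s : Nat) : Int :=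
  (List.range kk).foldl (fun h j => h * B + ids.getD (s + j) 0) 0

theorem pymod_modEq (a M : Int) : Int.ModEq M (PySem.Int.mod a M) a := by
  rw [Int.modEq_iff_dvd]
  exact ⟨PySem.Int.floordiv a M, by have := PySem.Int.floordiv_mul_add_mod a M; linarith⟩

theorem pymod_eq_of_modEq {x y M : Int} (hM : M ≠ 0) (h : Int.ModEq M x y) :
    PySem.Int.mod x M = PySem.Int.mod y M := by
  have hdx : M ∣ x - PySem.Int.mod x M :=
    ⟨PySem.Int.floordiv x M, by have := PySem.Int.floordiv_mul_add_mod x M; linarith⟩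
  have hdy : M ∣ y - PySem.Int.mod y M :=
    ⟨PySem.Int.floordiv y M, by have := PySem.Int.floordiv_mul_add_mod y M; linarith⟩
  have hd : M ∣ (PySem.Int.mod y M - PySem.Int.mod x M) := by
    have heq : PySem.Int.mod y M - PySem.Int.mod x M
        = (x - PySem.Int.mod x M) - (y - PySem.Int.mod y M) + (y - x) := by ring
    rw [heq]; exact dvd_add (dvd_sub hdx hdy) (Int.ModEq.dvd h)
  have habs : |PySem.Int.mod y M - PySem.Int.mod x M| < |M| := by
    rcases lt_or_gt_of_ne hM with hneg | hpos
    · have b1 := PySem.Int.mod_neg_bounds x hneg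
      have b2 := PySem.Int.mod_neg_bounds y hneg
      rw [abs_of_neg hneg, abs_lt]; omega
    · have b1 := PySem.Int.mod_nonneg x hpos
      have b2 := PySem.Int.mod_nonneg y hpos
      have c1 := PySem.Int.mod_lt x hpos
      have c2 := PySem.Int.mod_lt y hpos
      rw [abs_of_pos hpos, abs_lt]; omega
  have hz := Int.eq_zero_of_abs_lt_dvd ((abs_dvd M _).mpr hd) habs
  omega

-- a mod-ed Horner fold is congruent to the pure one
theorem foldmod_modEq (ids : List Int) (B M : Int) (s : Nat) (l : List Nat) :
    ∀ {c d : Int}, Int.ModEq M c d →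
    Int.ModEq M (l.foldl (fun h j => PySem.Int.mod (h * B + ids.getD (s + j) 0) M) c)
      (l.foldl (fun h j => h * B + ids.getD (s + j) 0) d) := by
  induction l with
  | nil => intro c d hcd; exact hcd
  | cons x l ih =>
    intro c d hcd
    exact ih ((pymod_modEq _ M).trans (Int.ModEq.add_right _ (Int.ModEq.mul_right B hcd)))

theorem win_modEq (ids : List Int) (B M : Int) (kk : Nat) (s : Nat) :
    Int.ModEq M (pvWin ids kk B M s) (pvP ids kk B s) := by
  exact foldmod_modEq ids B M s (List.range kk) (Int.ModEq.refl 0)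

theorem pvP_succ (ids : List Int) (B : Int) (n : Nat) (s : Nat) :
    pvP ids (n + 1) B s = pvP ids n B s * B + ids.getD (s + n) 0 := by
  unfold pvP; rw [List.range_succ, List.foldl_append]; rfl

-- the pure sliding identity
theorem pvP_shift (ids : List Int) (B : Int) (m : Nat) (s : Nat) :
    pvP ids (m + 1) B (s + 1)
      = (pvP ids (m + 1) B s - ids.getD s 0 * B ^ m) * B + ids.getD (s + 1 + m) 0 := by
  induction m with
  | zero =>
    simp [pvP]
  | succ m ih =>
    rw [pvP_succ ids B (m + 1) (s + 1), ih, pvP_succ ids B (m + 1) s]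
    have h1 : s + 1 + (m + 1) = s + (m + 1) + 1 := by omega
    have h2 : s + 1 + m = s + (m + 1) := by omega
    rw [h2]
    ring_nf

-- the sliding step of A produces the next window hash
theorem keystep (ids : List Int) (B M : Int) (hM : M ≠ 0) (kk : Nat) (hk : 1 ≤ kk) (s : Nat) :
    PySem.Int.mod
      ((PySem.Int.mod (pvWin ids kk B M s - ids.getD s 0 * PySem.Int.mod (B ^ (kk - 1)) M) M) * B
        + ids.getD (s + kk) 0) M
      = pvWin ids kk B M (s + 1) := by
  obtain ⟨m, rfl⟩ : ∃ m, kk = m + 1 := ⟨kk - 1, by omega⟩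
  simp only [Nat.add_sub_cancel]
  -- expose the outer mod of pvWin at s+1
  have hwin : pvWin ids (m + 1) B M (s + 1)
      = PySem.Int.mod
          (((List.range m).foldl (fun h j => PySem.Int.mod (h * B + ids.getD (s + 1 + j) 0) M) 0) * B
            + ids.getD (s + 1 + m) 0) M := by
    unfold pvWin; rw [List.range_succ, List.foldl_append]; rfl
  rw [hwin]
  apply pymod_eq_of_modEq hM
  -- left side ≡ (pvP (m+1) s - a_s * B^m) * B + a_{s+m+1} = pvP (m+1) (s+1)
  have h1 : Int.ModEq M
      ((PySem.Int.mod (pvWin ids (m+1) B M s - ids.getD s 0 * PySem.Int.mod (B ^ m) M) M) * B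
        + ids.getD (s + (m+1)) 0)
      ((pvP ids (m+1) B s - ids.getD s 0 * B ^ m) * B + ids.getD (s + (m+1)) 0) := by
    refine Int.ModEq.add_right _ (Int.ModEq.mul_right B ?_)
    refine (pymod_modEq _ _).trans ?_
    exact Int.ModEq.sub (win_modEq ids B M (m+1) s) (Int.ModEq.mul_left _ (pymod_modEq _ _))
  have h2 : (pvP ids (m+1) B s - ids.getD s 0 * B ^ m) * B + ids.getD (s + (m+1)) 0
      = pvP ids (m+1) B (s+1) := by
    rw [pvP_shift]
    have : s + 1 + m = s + (m + 1) := by omega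
    rw [this]
  have h3 : Int.ModEq M (pvP ids (m+1) B (s+1))
      (((List.range m).foldl (fun h j => PySem.Int.mod (h * B + ids.getD (s + 1 + j) 0) M) 0) * B
        + ids.getD (s + 1 + m) 0) := by
    rw [pvP_succ]
    exact Int.ModEq.add_right _ (Int.ModEq.mul_right B
      (foldmod_modEq ids B M (s+1) (List.range m) (Int.ModEq.refl 0)).symm)
  exact (h1.trans (h2 ▸ Int.ModEq.refl _)).trans h3


-- the slide loop, as a fold over pyRange, unrolled to a map of window hashes
theorem slide (ids : List Int) (B M : Int) (hM : M ≠ 0) (kk : Nat) (hk : 1 ≤ kk)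
    (c : Nat) :
    ∀ (s : Nat) (acc : List (Int × Int)),
    ((PySem.List.pyRange ((s : Int) + kk) ((s : Int) + kk + c) 1).foldl
        (fun (st : Int × List (Int × Int)) i =>
          let c1 := PySem.Int.mod (st.1 - PySem.List.pyGetD ids (i - (kk : Int)) 0 * PySem.Int.mod (B ^ (kk - 1)) M) M
          let c2 := PySem.Int.mod (c1 * B + PySem.List.pyGetD ids i 0) M
          (c2, st.2 ++ [(c2, i - (kk : Int) + 1)]))
        (pvWin ids kk B M s, acc))
      = (pvWin ids kk B M (s + c),
         acc ++ (List.range c).map (fun t => (pvWin ids kk B M (s + 1 + t), ((s : Int) + 1 + t)))) := by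
  induction c with
  | zero =>
    intro s acc
    rw [PySem.List.pyRange_one_eq_nil (by omega)]
    simp
  | succ c ih =>
    intro s acc
    rw [PySem.List.pyRange_one_cons (by push_cast; omega)]
    rw [List.foldl_cons]
    -- simplify the head step
    have e1 : ((s : Int) + kk - kk) = (s : Int) := by ring
    have e2 : PySem.List.pyGetD ids ((s : Int)) 0 = ids.getD s 0 := by
      simp [PySem.List.pyGetD_natCast]
    have e3 : PySem.List.pyGetD ids ((s : Int) + kk) 0 = ids.getD (s + kk) 0 := by
      have : ((s : Int) + kk) = ((s + kk : Nat) : Int) := by push_cast; ring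
      rw [this, PySem.List.pyGetD_natCast]
    simp only [e1, e2, e3]
    rw [keystep ids B M hM kk hk s]
    have e4 : (s : Int) + kk + 1 = ((s+1 : Nat) : Int) + kk := by push_cast; ring
    have e5 : (s : Int) + kk + (c+1 : Nat) = ((s+1 : Nat) : Int) + kk + c := by push_cast; ring
    rw [e4, e5, ih (s+1) (acc ++ [(pvWin ids kk B M (s+1), (s:Int) + 1)])]
    have hfst : s + 1 + c = s + (c + 1) := by omega
    rw [hfst, List.range_succ_eq_map, List.map_cons, List.map_map, List.append_assoc,
      List.singleton_append]
    congr 2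
    congr 1
    apply List.map_congr_left
    intro t _
    have h1 : s + 1 + 1 + t = s + 1 + (t + 1) := by omega
    simp only [Function.comp_apply, Nat.succ_eq_add_one, h1, Prod.mk.injEq]
    exact ⟨trivial, by push_cast; ring⟩

theorem initfoldB (ids : List Int) (B M : Int) (kk : Nat) (s : Nat) :
    (PySem.List.pyRange 0 (kk : Int) 1).foldl
      (fun h j => PySem.Int.mod (h * B + PySem.List.pyGetD ids ((s : Int) + j) 0) M) 0
      = pvWin ids kk B M s := by
  rw [PySem.List.pyRange_one, List.foldl_map]
  unfold pvWin
  have hn : (((kk : Int)) - 0).toNat = kk := by omega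
  rw [hn]
  have hf : (fun (h : Int) (t : Nat) => PySem.Int.mod (h * B + PySem.List.pyGetD ids ((s : Int) + ((0 : Int) + (t : Int))) 0) M)
      = fun (h : Int) (t : Nat) => PySem.Int.mod (h * B + ids.getD (s + t) 0) M := by
    funext h t
    have : (s : Int) + ((0 : Int) + (t : Int)) = ((s + t : Nat) : Int) := by push_cast; ring
    rw [this, PySem.List.pyGetD_natCast]
  rw [hf]

theorem initfoldA (ids : List Int) (B M : Int) (kk : Nat) :
    (PySem.List.pyRange 0 (kk : Int) 1).foldl
      (fun h i => PySem.Int.mod (h * B + PySem.List.pyGetD ids i 0) M) 0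
      = pvWin ids kk B M 0 := by
  rw [PySem.List.pyRange_one, List.foldl_map]
  unfold pvWin
  have hn : (((kk : Int)) - 0).toNat = kk := by omega
  rw [hn]
  have hf : (fun (h : Int) (t : Nat) => PySem.Int.mod (h * B + PySem.List.pyGetD ids ((0 : Int) + (t : Int)) 0) M)
      = fun (h : Int) (t : Nat) => PySem.Int.mod (h * B + ids.getD (0 + t) 0) M := by
    funext h t
    have : (0 : Int) + (t : Int) = ((0 + t : Nat) : Int) := by push_cast; ring
    rw [this, PySem.List.pyGetD_natCast]
  rw [hf]

-- ===== VERDICT (by name: the statement is the Claim_ definition above) =====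
theorem rolling_hash_spec : Claim_equal_rolling_hash := by
  intro ids k B M _ hPre
  obtain ⟨hk, hPre2⟩ := hPre
  unfold Spec_rolling_hash rolling_hash rolling_hash_alt
  by_cases hlt : ((ids.length : Int)) < k
  · simp only [if_pos hlt]
  · simp only [if_neg hlt]
    have hM : M ≠ 0 := by
      rcases hPre2 with h | h
      · exact absurd h hlt
      · exact h
    obtain ⟨kk, rfl⟩ : ∃ kk : Nat, k = (kk : Int) :=
      ⟨k.toNat, (Int.toNat_of_nonneg (by omega)).symm⟩
    have hkk : 1 ≤ kk := by exact_mod_cast hk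
    have hlen : kk ≤ ids.length := by omega
    obtain ⟨c, hc⟩ : ∃ c : Nat, ids.length = kk + c := ⟨ids.length - kk, by omega⟩
    rw [initfoldA ids B M kk]
    have hpow : (((kk : Int)) - 1).toNat = kk - 1 := by omega
    simp only [PySem.Int.powMod, hpow]
    have hrange : PySem.List.pyRange (kk : Int) (ids.length : Int) 1
        = PySem.List.pyRange (((0 : Nat) : Int) + kk) (((0 : Nat) : Int) + kk + c) 1 := by
      rw [hc]; push_cast; ring_nf
    rw [hrange, slide ids B M hM kk hkk c 0 [(pvWin ids kk B M 0, 0)]]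
    rw [PySem.List.foldl_append_singleton_eq_map]
    have hr2 : ((ids.length : Int) - (kk : Int) + 1) = ((c + 1 : Nat) : Int) := by
      rw [hc]; push_cast; ring
    rw [hr2, PySem.List.pyRange_one 0 ((c + 1 : Nat) : Int)]
    have hr3 : (((c + 1 : Nat) : Int) - 0).toNat = c + 1 := by omega
    rw [hr3, List.map_map, List.nil_append]
    have hG : ∀ t : Nat,
        ((fun start => ((PySem.List.pyRange 0 (kk : Int) 1).foldl
            (fun h j => PySem.Int.mod (h * B + PySem.List.pyGetD ids (start + j) 0) M) 0, start))
          ∘ fun t : Nat => (0 : Int) + (t : Int)) t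
        = (pvWin ids kk B M t, (t : Int)) := by
      intro t
      dsimp only [Function.comp]
      rw [zero_add, initfoldB ids B M kk t]
    rw [List.map_congr_left (fun t _ => hG t)]
    rw [List.range_succ_eq_map, List.map_cons, List.map_map, List.singleton_append]
    dsimp only
    congr 1
    apply List.map_congr_left
    intro t _
    simp only [Function.comp_apply, Nat.succ_eq_add_one, Prod.mk.injEq]
    constructor
    · have h1 : 0 + 1 + t = t + 1 := by omega
      rw [h1]
    · push_cast; ring
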